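-- pv_equiv track=rewrite | github.com/shaikhshehabahamed/Multi-Period-Quantum-Routing-for-Trusted-Relay-Networks | qkd_encoding.py | _enumerate_simple_paths
-- ===== SOURCE A (Python) =====
-- from typing import Dict, List, Optional, Tuple
--
-- def _enumerate_simple_paths(
--     adj: Dict[int, List[Tuple[int, int]]],
--     src: int,
--     dst: int,
--     max_hops: int,
--     limit: int,
-- ) -> List[Tuple[Tuple[int, ...], Tuple[int, ...]]]:
--     """Enumerate simple paths up to max_hops; return list[(nodes, edge_ids)]."""
--     out: List[Tuple[Tuple[int, ...], Tuple[int, ...]]] = []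
--
--     stack: List[Tuple[int, List[int], List[int], set]] = [(src, [src], [], {src})]
--     while stack and len(out) < limit:
--         node, path_nodes, path_edges, seen = stack.pop()
--         if len(path_edges) > max_hops:
--             continue
--         if node == dst:
--             out.append((tuple(path_nodes), tuple(path_edges)))
--             continue
--         for nb, eid in adj.get(node, []):
--             if nb in seen:
--                 continue
--             stack.append((nb, path_nodes + [nb], path_edges + [eid], seen | {nb}))
--     return out
-- ===== SOURCE B (Python) =====
-- from typing import Dict, List, Tuple
--
-- def _enumerate_simple_paths(
--     adj: Dict[int, List[Tuple[int, int]]],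
--     src: int,
--     dst: int,
--     max_hops: int,
--     limit: int,
-- ) -> List[Tuple[Tuple[int, ...], Tuple[int, ...]]]:
--     """Recursive DFS; neighbors visited in reverse adjacency order (LIFO order)."""
--     out: List[Tuple[Tuple[int, ...], Tuple[int, ...]]] = []
--
--     def dfs(node: int, path_nodes: List[int], path_edges: List[int], seen: set) -> None:
--         if len(out) >= limit or len(path_edges) > max_hops:
--             return
--         if node == dst:
--             out.append((tuple(path_nodes), tuple(path_edges)))
--             return
--         for nb, eid in reversed(adj.get(node, [])):
--             if nb in seen:
--                 continue
--             dfs(nb, path_nodes + [nb], path_edges + [eid], seen | {nb})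
--
--     dfs(src, [src], [], {src})
--     return out
-- ===== Notes on version B (the rewrite author's own statement) =====
-- stated objective: alternative
-- what changed: Replaced the explicit worklist-stack while loop by a recursive DFS helper that shares the output accumulator and visits neighbors in reverse adjacency order, reproducing the stack's LIFO traversal order and the global limit cutoff.
import Mathlib
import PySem

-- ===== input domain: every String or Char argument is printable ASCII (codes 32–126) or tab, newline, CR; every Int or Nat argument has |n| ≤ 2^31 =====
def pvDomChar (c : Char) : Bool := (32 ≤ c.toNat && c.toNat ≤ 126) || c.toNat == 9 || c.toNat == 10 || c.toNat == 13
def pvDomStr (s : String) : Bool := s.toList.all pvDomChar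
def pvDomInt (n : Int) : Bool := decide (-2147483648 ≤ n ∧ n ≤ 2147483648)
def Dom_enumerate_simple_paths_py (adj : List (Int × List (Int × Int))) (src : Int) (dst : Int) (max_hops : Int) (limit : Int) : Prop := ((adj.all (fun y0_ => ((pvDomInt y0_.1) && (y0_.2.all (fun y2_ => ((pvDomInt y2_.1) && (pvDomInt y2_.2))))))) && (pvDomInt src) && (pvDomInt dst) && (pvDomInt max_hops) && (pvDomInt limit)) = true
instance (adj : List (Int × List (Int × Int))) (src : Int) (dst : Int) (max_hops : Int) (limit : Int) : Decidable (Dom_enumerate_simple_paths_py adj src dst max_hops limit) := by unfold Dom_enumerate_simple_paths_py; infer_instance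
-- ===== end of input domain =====

-- B replaces A's explicit worklist stack by a recursive DFS helper (objective: alternative
-- decomposition, same cost); equal output lists, including traversal order and the limit cutoff.

-- fuel bound shared by both ports: a totality guard only; the equivalence proof is
-- fuel-synchronised, so the claim does not depend on the size of this bound
def pvFuel (adj : List (Int × List (Int × Int))) : Nat :=
  (adj.foldl (fun a p => a + p.2.length) 0 + 3) ^ (adj.foldl (fun a p => a + p.2.length) 0 + 3)

-- ===== PORT A =====
-- the while loop over the explicit stack (head of the list = top of the stack);
-- fuel decreases once per loop iteration (per pop)
def pvLoopA (adj : PySem.Dict Int (List (Int × Int))) (dst max_hops limit : Int) :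
    Nat → List (Int × List Int × List Int × PySem.Set Int) → List (List Int × List Int) →
    List (List Int × List Int)
  | 0, _, out => out
  | _ + 1, [], out => out
  | f + 1, (node, pn, pe, seen) :: rest, out =>
    if limit ≤ (out.length : Int) then out
    else if max_hops < (pe.length : Int) then pvLoopA adj dst max_hops limit f rest out
    else if node = dst then pvLoopA adj dst max_hops limit f rest (out ++ [(pn, pe)])
    else
      pvLoopA adj dst max_hops limit f
        ((PySem.Dict.getD adj node []).foldl
          (fun st p =>
            if PySem.Set.contains seen p.1 then st
            else (p.1, pn ++ [p.1], pe ++ [p.2], PySem.Set.add seen p.1) :: st)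
          rest)
        out

def enumerate_simple_paths_py (adj : List (Int × List (Int × Int))) (src : Int) (dst : Int) (max_hops : Int) (limit : Int) : List (List Int × List Int) :=
  pvLoopA (PySem.Dict.mk adj) dst max_hops limit (pvFuel adj)
    [(src, [src], [], PySem.Set.ofList [src])] []

-- ===== PORT B =====
-- recursive DFS with a threaded accumulator `out`; the returned Nat is the remaining fuel
-- (fuel threading and the `min` on it are totality guards only; the Python B has no fuel)
mutual
def pvDfsB (adj : PySem.Dict Int (List (Int × Int))) (dst max_hops limit : Int) :
    Nat → Int → List Int → List Int → PySem.Set Int → List (List Int × List Int) →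
    List (List Int × List Int) × Nat
  | 0, _, _, _, _, out => (out, 0)
  | f + 1, node, pn, pe, seen, out =>
    if limit ≤ (out.length : Int) ∨ max_hops < (pe.length : Int) then (out, f)
    else if node = dst then (out ++ [(pn, pe)], f)
    else pvGoB adj dst max_hops limit f ((PySem.Dict.getD adj node []).reverse) pn pe seen out
  termination_by f _ _ _ _ _ => (f, 0)
  decreasing_by all_goals (simp_wf; simp [Prod.lex_iff]; try omega)

-- the `for nb, eid in reversed(adj.get(node, []))` loop of B
def pvGoB (adj : PySem.Dict Int (List (Int × Int))) (dst max_hops limit : Int) :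
    Nat → List (Int × Int) → List Int → List Int → PySem.Set Int → List (List Int × List Int) →
    List (List Int × List Int) × Nat
  | f, [], _, _, _, out => (out, f)
  | f, (nb, eid) :: t, pn, pe, seen, out =>
    if PySem.Set.contains seen nb then pvGoB adj dst max_hops limit f t pn pe seen out
    else
      let r := pvDfsB adj dst max_hops limit f nb (pn ++ [nb]) (pe ++ [eid]) (PySem.Set.add seen nb) out
      pvGoB adj dst max_hops limit (min r.2 f) t pn pe seen r.1
  termination_by f t _ _ _ _ => (f, t.length + 1)
  decreasing_by all_goals (simp_wf; simp [Prod.lex_iff]; try omega)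
end

def enumerate_simple_paths_py_alt (adj : List (Int × List (Int × Int))) (src : Int) (dst : Int) (max_hops : Int) (limit : Int) : List (List Int × List Int) :=
  (pvDfsB (PySem.Dict.mk adj) dst max_hops limit (pvFuel adj) src [src] [] (PySem.Set.ofList [src]) []).1

-- ===== PRECONDITION & SPEC =====
def Spec_enumerate_simple_paths_py (adj : List (Int × List (Int × Int))) (src : Int) (dst : Int) (max_hops : Int) (limit : Int) (out : List (List Int × List Int)) : Prop := out = enumerate_simple_paths_py_alt adj src dst max_hops limit
instance (adj : List (Int × List (Int × Int))) (src : Int) (dst : Int) (max_hops : Int) (limit : Int) (out : List (List Int × List Int)) : Decidable (Spec_enumerate_simple_paths_py adj src dst max_hops limit out) := by unfold Spec_enumerate_simple_paths_py; infer_instance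

-- ===== CLAIM (what is proved, stated in full; the proofs are below) =====
def Claim_equal_enumerate_simple_paths_py : Prop := ∀ (adj : List (Int × List (Int × Int))) (src : Int) (dst : Int) (max_hops : Int) (limit : Int), Dom_enumerate_simple_paths_py adj src dst max_hops limit → Spec_enumerate_simple_paths_py adj src dst max_hops limit (enumerate_simple_paths_py adj src dst max_hops limit)

-- ===== LEMMAS AND PROOFS =====

-- proof-only helper: run B's dfs over a whole worklist, threading `out` and the fuel
def pvRun (adj : PySem.Dict Int (List (Int × Int))) (dst max_hops limit : Int) :
    Nat → List (Int × List Int × List Int × PySem.Set Int) → List (List Int × List Int) →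
    List (List Int × List Int)
  | _, [], out => out
  | f, (node, pn, pe, seen) :: t, out =>
    pvRun adj dst max_hops limit (pvDfsB adj dst max_hops limit f node pn pe seen out).2 t
      (pvDfsB adj dst max_hops limit f node pn pe seen out).1

-- proof-only helper: the stack entries A pushes for a neighbour list, in push order
def pvEntries (pn pe : List Int) (seen : PySem.Set Int) (m : List (Int × Int)) :
    List (Int × List Int × List Int × PySem.Set Int) :=
  (m.filter (fun p => !PySem.Set.contains seen p.1)).map
    (fun p => (p.1, pn ++ [p.1], pe ++ [p.2], PySem.Set.add seen p.1))

theorem pvDfsB_fst_of_limit (adj : PySem.Dict Int (List (Int × Int))) (dst max_hops limit : Int)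
    (f : Nat) (node : Int) (pn pe : List Int) (seen : PySem.Set Int)
    (out : List (List Int × List Int)) (h : limit ≤ (out.length : Int)) :
    (pvDfsB adj dst max_hops limit f node pn pe seen out).1 = out := by
  cases f with
  | zero => simp [pvDfsB]
  | succ f => simp [pvDfsB, h]

theorem pvRun_of_limit (adj : PySem.Dict Int (List (Int × Int))) (dst max_hops limit : Int)
    (s : List (Int × List Int × List Int × PySem.Set Int)) :
    ∀ (f : Nat) (out : List (List Int × List Int)), limit ≤ (out.length : Int) →
      pvRun adj dst max_hops limit f s out = out := by
  induction s with
  | nil => intro f out _; rfl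
  | cons e t ih =>
    intro f out h
    obtain ⟨node, pn, pe, seen⟩ := e
    simp only [pvRun, pvDfsB_fst_of_limit adj dst max_hops limit f node pn pe seen out h]
    exact ih _ out h

theorem pvRun_zero (adj : PySem.Dict Int (List (Int × Int))) (dst max_hops limit : Int)
    (s : List (Int × List Int × List Int × PySem.Set Int)) :
    ∀ (out : List (List Int × List Int)), pvRun adj dst max_hops limit 0 s out = out := by
  induction s with
  | nil => intro out; rfl
  | cons e t ih =>
    intro out
    obtain ⟨node, pn, pe, seen⟩ := e
    have h0 : pvDfsB adj dst max_hops limit 0 node pn pe seen out = (out, 0) := by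
      simp [pvDfsB]
    simp only [pvRun, h0]
    exact ih out

theorem pvGoB_snd_le (adj : PySem.Dict Int (List (Int × Int))) (dst max_hops limit : Int)
    (t : List (Int × Int)) : ∀ (f : Nat) (pn pe : List Int) (seen : PySem.Set Int)
    (out : List (List Int × List Int)),
    (pvGoB adj dst max_hops limit f t pn pe seen out).2 ≤ f := by
  induction t with
  | nil => intro f pn pe seen out; simp [pvGoB]
  | cons h t ih =>
    intro f pn pe seen out
    obtain ⟨nb, eid⟩ := h
    by_cases hs : PySem.Set.contains seen nb
    · have hm : nb ∈ seen := by simpa using hs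
      simpa [pvGoB, hm] using ih f pn pe seen out
    · have hm : nb ∉ seen := by simpa using hs
      simp only [pvGoB, hs, Bool.false_eq_true, if_false]
      exact le_trans (ih _ pn pe seen _) (Nat.min_le_right _ _)

theorem pvDfsB_snd_le (adj : PySem.Dict Int (List (Int × Int))) (dst max_hops limit : Int)
    (f : Nat) (node : Int) (pn pe : List Int) (seen : PySem.Set Int)
    (out : List (List Int × List Int)) :
    (pvDfsB adj dst max_hops limit f node pn pe seen out).2 ≤ f := by
  cases f with
  | zero => simp [pvDfsB]
  | succ f =>
    simp only [pvDfsB]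
    split_ifs with h1 h2
    · exact Nat.le_succ f
    · exact Nat.le_succ f
    · exact le_trans (pvGoB_snd_le adj dst max_hops limit _ f pn pe seen out) (Nat.le_succ f)

theorem pvRun_entries (adj : PySem.Dict Int (List (Int × Int))) (dst max_hops limit : Int)
    (pn pe : List Int) (seen : PySem.Set Int) (rest : List (Int × List Int × List Int × PySem.Set Int))
    (m : List (Int × Int)) : ∀ (f : Nat) (out : List (List Int × List Int)),
    pvRun adj dst max_hops limit f (pvEntries pn pe seen m ++ rest) out =
      pvRun adj dst max_hops limit (pvGoB adj dst max_hops limit f m pn pe seen out).2 rest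
        (pvGoB adj dst max_hops limit f m pn pe seen out).1 := by
  induction m with
  | nil =>
    intro f out
    simp [pvEntries, pvGoB]
  | cons h t ih =>
    intro f out
    obtain ⟨nb, eid⟩ := h
    by_cases hs : PySem.Set.contains seen nb
    · have hm : nb ∈ seen := by simpa using hs
      have he : pvEntries pn pe seen ((nb, eid) :: t) = pvEntries pn pe seen t := by
        simp [pvEntries, hm]
      rw [he]
      simp only [pvGoB, hs, if_true]
      exact ih f out
    · have hm : nb ∉ seen := by simpa using hs
      have he : pvEntries pn pe seen ((nb, eid) :: t) =
        (nb, pn ++ [nb], pe ++ [eid], PySem.Set.add seen nb) :: pvEntries pn pe seen t := by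
        simp [pvEntries, hm]
      rw [he]
      have hmin : min (pvDfsB adj dst max_hops limit f nb (pn ++ [nb]) (pe ++ [eid])
          (PySem.Set.add seen nb) out).2 f =
          (pvDfsB adj dst max_hops limit f nb (pn ++ [nb]) (pe ++ [eid])
          (PySem.Set.add seen nb) out).2 :=
        Nat.min_eq_left (pvDfsB_snd_le adj dst max_hops limit f nb _ _ _ out)
      simp only [List.cons_append, pvRun, pvGoB, hs, Bool.false_eq_true, if_false, hmin]
      exact ih _ _

theorem pvFold_push (pn pe : List Int) (seen : PySem.Set Int) (l : List (Int × Int)) :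
    ∀ (acc : List (Int × List Int × List Int × PySem.Set Int)),
    l.foldl
      (fun st p =>
        if PySem.Set.contains seen p.1 then st
        else (p.1, pn ++ [p.1], pe ++ [p.2], PySem.Set.add seen p.1) :: st)
      acc = pvEntries pn pe seen l.reverse ++ acc := by
  induction l with
  | nil => intro acc; rfl
  | cons h t ih =>
    intro acc
    obtain ⟨nb, eid⟩ := h
    by_cases hs : PySem.Set.contains seen nb
    · have hm : nb ∈ seen := by simpa using hs
      simp only [List.foldl_cons, hs, if_true, ih]
      have : pvEntries pn pe seen ((nb, eid) :: t).reverse = pvEntries pn pe seen t.reverse := by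
        simp [pvEntries, List.filter_append, hm]
      rw [this]
    · have hm : nb ∉ seen := by simpa using hs
      simp only [List.foldl_cons, hs, Bool.false_eq_true, if_false, ih]
      have : pvEntries pn pe seen ((nb, eid) :: t).reverse =
          pvEntries pn pe seen t.reverse ++ [(nb, pn ++ [nb], pe ++ [eid], PySem.Set.add seen nb)] := by
        simp [pvEntries, List.filter_append, hm]
      rw [this, List.append_assoc]
      rfl

theorem pvLoopA_eq_pvRun (adj : PySem.Dict Int (List (Int × Int))) (dst max_hops limit : Int) :
    ∀ (f : Nat) (s : List (Int × List Int × List Int × PySem.Set Int))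
      (out : List (List Int × List Int)),
    pvLoopA adj dst max_hops limit f s out = pvRun adj dst max_hops limit f s out := by
  intro f
  induction f with
  | zero => intro s out; rw [pvRun_zero]; rfl
  | succ f ih =>
    intro s out
    cases s with
    | nil => rfl
    | cons e rest =>
      obtain ⟨node, pn, pe, seen⟩ := e
      by_cases hl : limit ≤ (out.length : Int)
      · have hdfs : pvDfsB adj dst max_hops limit (f + 1) node pn pe seen out = (out, f) := by
          simp [pvDfsB, hl]
        simp only [pvLoopA, hl, if_true, pvRun, hdfs]
        exact (pvRun_of_limit adj dst max_hops limit rest f out hl).symm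
      · by_cases hh : max_hops < (pe.length : Int)
        · have hdfs : pvDfsB adj dst max_hops limit (f + 1) node pn pe seen out = (out, f) := by
            simp [pvDfsB, hh]
          simp only [pvLoopA, hl, if_false, hh, if_true, pvRun, hdfs]
          exact ih rest out
        · by_cases hd : node = dst
          · have hdfs : pvDfsB adj dst max_hops limit (f + 1) dst pn pe seen out =
                (out ++ [(pn, pe)], f) := by
              simp [pvDfsB, hl, hh]
            simp only [pvLoopA, hl, if_false, hh, if_false, hd, if_true, pvRun, hdfs]
            exact ih rest (out ++ [(pn, pe)])
          · have hdfs : pvDfsB adj dst max_hops limit (f + 1) node pn pe seen out =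
                pvGoB adj dst max_hops limit f ((PySem.Dict.getD adj node []).reverse)
                  pn pe seen out := by
              simp [pvDfsB, hl, hh, hd]
            simp only [pvLoopA, hl, if_false, hh, if_false, hd, if_false, pvRun, hdfs]
            rw [pvFold_push, ih, pvRun_entries]

-- ===== VERDICT (by name: the statement is the Claim_ definition above) =====
theorem enumerate_simple_paths_py_spec : Claim_equal_enumerate_simple_paths_py := by
  intro adj src dst max_hops limit _
  unfold Spec_enumerate_simple_paths_py enumerate_simple_paths_py enumerate_simple_paths_py_alt
  rw [pvLoopA_eq_pvRun]
  rfl
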